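-- pv_equiv track=rewrite | github.com/tahiri-lab/overlap-tree-data-pipeline | datasets/datasets-mode2/mode2_validation.py | extract_newick_trees
-- ===== SOURCE A (Python) =====
-- from typing import List, Sequence
--
-- def extract_newick_trees(text: str) -> List[str]:
--     """Extract Newick trees terminated by ';' from a text blob."""
--     trees: List[str] = []
--     current: List[str] = []
--     for ch in text:
--         current.append(ch)
--         if ch == ";":
--             tree = "".join(current).strip()
--             if tree:
--                 trees.append(tree)
--             current = []
--     tail = "".join(current).strip()
--     if tail:
--         raise ValueError("Input contains trailing non-empty text after the last ';'.")
--     return trees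
-- ===== SOURCE B (Python) =====
-- from typing import List
--
--
-- def extract_newick_trees(text: str) -> List[str]:
--     """Extract Newick trees terminated by ';' from a text blob."""
--     parts = text.split(';')
--     if parts[-1].strip():
--         raise ValueError("Input contains trailing non-empty text after the last ';'.")
--     return [(part + ';').strip() for part in parts[:-1]]
-- ===== Notes on version B (the rewrite author's own statement) =====
-- stated objective: idiomatic
-- what changed: Replaces the character-accumulation loop (growing a current buffer and flushing it at each ';') with a single str.split(';') followed by a comprehension over the segments, checking the final segment as the trailing tail.
import Mathlib
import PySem

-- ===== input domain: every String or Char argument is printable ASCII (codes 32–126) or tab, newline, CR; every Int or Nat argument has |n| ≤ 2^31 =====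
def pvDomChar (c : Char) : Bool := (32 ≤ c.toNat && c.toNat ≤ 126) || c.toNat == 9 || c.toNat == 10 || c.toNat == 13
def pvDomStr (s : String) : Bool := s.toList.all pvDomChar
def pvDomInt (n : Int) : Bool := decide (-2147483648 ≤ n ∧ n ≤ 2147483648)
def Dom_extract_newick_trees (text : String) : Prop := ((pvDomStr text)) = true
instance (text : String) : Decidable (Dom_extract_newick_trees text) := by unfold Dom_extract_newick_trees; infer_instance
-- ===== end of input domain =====

-- B replaces A's character-accumulation loop by one str.split(';') plus a
-- comprehension over the segments (idiomatic decomposition, same cost).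

-- ===== PORT A =====
-- literal transliteration of A's char loop: state = (trees so far, current buffer)
def extract_newick_trees (text : String) : List String :=
  let step : (List String × List Char) → Char → (List String × List Char) :=
    fun st ch =>
      let current := st.2 ++ [ch]
      if ch == ';' then
        let tree := PySem.Chars.strip current
        (if tree ≠ [] then st.1 ++ [String.ofList tree] else st.1, [])
      else (st.1, current)
  -- the trailing-tail check raises in Python; those inputs are excluded by Pre_
  (text.toList.foldl step ([], [])).1

-- ===== PORT B =====
-- literal transliteration of B: split on ';', map over all but the last segment
def extract_newick_trees_alt (text : String) : List String :=
  let parts := PySem.Chars.splitOn text.toList [';']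
  -- the raise branch (last segment strips non-empty) is excluded by Pre_
  parts.dropLast.map (fun part => String.ofList (PySem.Chars.strip (part ++ [';'])))

-- ===== PRECONDITION & SPEC =====
-- Pre_ excludes exactly the inputs where Python A (and B) raise ValueError:
-- the text after the last ';' (the whole text if there is none) is not all whitespace.
def Pre_extract_newick_trees (text : String) : Prop :=
  PySem.Chars.strip ((PySem.Chars.splitOn text.toList [';']).getLastD []) = []
instance (text : String) : Decidable (Pre_extract_newick_trees text) := by
  unfold Pre_extract_newick_trees; infer_instance

def pvWitness_extract_newick_trees : String := "(a,b);(c,d); "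

def Spec_extract_newick_trees (text : String) (out : List String) : Prop := out = extract_newick_trees_alt text
instance (text : String) (out : List String) : Decidable (Spec_extract_newick_trees text out) := by unfold Spec_extract_newick_trees; infer_instance

-- ===== CLAIM (what is proved, stated in full; the proofs are below) =====
def Claim_equal_extract_newick_trees : Prop := ∀ (text : String), Dom_extract_newick_trees text → Pre_extract_newick_trees text → Spec_extract_newick_trees text (extract_newick_trees text)

-- ===== LEMMAS AND PROOFS =====

-- prepend a prefix onto the first piece of a split
def pvPrep (p : List Char) : List (List Char) → List (List Char)
  | [] => [p]
  | h :: t => (p ++ h) :: t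

-- the natural structural recursion for splitting on ';'
def pvSplit : List Char → List (List Char)
  | [] => [[]]
  | c :: rest => if c = ';' then [] :: pvSplit rest else pvPrep [c] (pvSplit rest)

theorem pvSplit_ne_nil (l : List Char) : pvSplit l ≠ [] := by
  cases l with
  | nil => simp [pvSplit]
  | cons c rest =>
    simp only [pvSplit]
    split
    · simp
    · cases h : pvSplit rest <;> simp [pvPrep]

theorem pvPrep_nil {s : List (List Char)} (h : s ≠ []) : pvPrep [] s = s := by
  cases s with
  | nil => exact absurd rfl h
  | cons x t => simp [pvPrep]

theorem pvPrep_pvPrep (p q : List Char) (s : List (List Char)) :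
    pvPrep p (pvPrep q s) = pvPrep (p ++ q) s := by
  cases s <;> simp [pvPrep]

theorem splitOn_go_eq (l : List Char) : ∀ (fuel : Nat) (cur : List Char)
    (acc : List (List Char)), l.length < fuel →
    PySem.Chars.splitOn.go [';'] fuel l cur acc
      = acc.reverse ++ pvPrep cur.reverse (pvSplit l) := by
  induction l with
  | nil =>
    intro fuel cur acc h
    obtain ⟨f, rfl⟩ := Nat.exists_eq_succ_of_ne_zero (n := fuel) (by omega)
    simp [PySem.Chars.splitOn.go, pvSplit, pvPrep]
  | cons c rest ih =>
    intro fuel cur acc h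
    obtain ⟨f, rfl⟩ := Nat.exists_eq_succ_of_ne_zero (n := fuel) (by omega)
    have hf : rest.length < f := by simpa using Nat.lt_of_succ_lt_succ h
    by_cases hc : c = ';'
    · subst hc
      have hpre : List.isPrefixOf [';'] (';' :: rest) = true := by
        simp [List.isPrefixOf]
      rw [PySem.Chars.splitOn.go, if_pos hpre]
      simp only [List.length_cons, List.length_nil, List.drop_succ_cons, List.drop_zero]
      rw [ih f [] (cur.reverse :: acc) hf]
      simp only [List.reverse_nil]
      rw [pvPrep_nil (pvSplit_ne_nil rest)]
      simp [pvSplit, pvPrep]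
    · have hpre : List.isPrefixOf [';'] (c :: rest) = false := by
        simp [List.isPrefixOf]
        intro hcc
        exact absurd hcc.symm hc
      rw [PySem.Chars.splitOn.go, if_neg (by simp [hpre])]
      rw [ih f (c :: cur) acc hf]
      simp only [pvSplit, if_neg hc, List.reverse_cons]
      rw [pvPrep_pvPrep]

theorem splitOn_eq_pvSplit (l : List Char) :
    PySem.Chars.splitOn l [';'] = pvSplit l := by
  unfold PySem.Chars.splitOn
  rw [splitOn_go_eq l (l.length + 1) [] [] (Nat.lt_succ_self _)]
  simp [pvPrep_nil (pvSplit_ne_nil l)]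

-- stripping a buffer that ends in ';' never yields the empty string
theorem mem_dropWhile_semi (q : List Char) :
    ';' ∈ List.dropWhile PySem.Chars.isspace (q ++ [';']) := by
  induction q with
  | nil => simp [PySem.Chars.isspace]
  | cons a q ih =>
    by_cases ha : PySem.Chars.isspace a = true
    · simpa [ha] using ih
    · simp [ha]

theorem strip_append_semi_ne_nil (q : List Char) :
    PySem.Chars.strip (q ++ [';']) ≠ [] := by
  intro h
  unfold PySem.Chars.strip PySem.Chars.rstrip at h
  have h2 : List.dropWhile PySem.Chars.isspace
      (PySem.Chars.lstrip (q ++ [';'])).reverse = [] := by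
    simpa using congrArg List.reverse h
  rw [List.dropWhile_eq_nil_iff] at h2
  have hmem : ';' ∈ (PySem.Chars.lstrip (q ++ [';'])).reverse := by
    rw [List.mem_reverse]
    unfold PySem.Chars.lstrip
    exact mem_dropWhile_semi q
  have := h2 ';' hmem
  simp [PySem.Chars.isspace] at this

-- the characterisation of A's accumulation loop
theorem loopA (l : List Char) : ∀ (trees : List String) (cur : List Char),
    (l.foldl (fun st ch =>
      let current := st.2 ++ [ch]
      if ch == ';' then
        let tree := PySem.Chars.strip current
        (if tree ≠ [] then st.1 ++ [String.ofList tree] else st.1, ([] : List Char))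
      else (st.1, current)) (trees, cur)).1
    = trees ++ (pvPrep cur (pvSplit l)).dropLast.map
        (fun part => String.ofList (PySem.Chars.strip (part ++ [';']))) := by
  induction l with
  | nil =>
    intro trees cur
    simp [pvSplit, pvPrep]
  | cons c rest ih =>
    intro trees cur
    by_cases hc : c = ';'
    · subst hc
      rw [List.foldl_cons]
      simp only [beq_self_eq_true, if_pos]
      rw [if_pos (strip_append_semi_ne_nil cur)]
      rw [ih (trees ++ [String.ofList (PySem.Chars.strip (cur ++ [';']))]) []]
      rw [pvPrep_nil (pvSplit_ne_nil rest)]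
      have e1 : pvPrep cur (pvSplit (';' :: rest)) = cur :: pvSplit rest := by
        simp [pvSplit, pvPrep]
      rw [e1, List.dropLast_cons_of_ne_nil (pvSplit_ne_nil rest)]
      simp
    · rw [List.foldl_cons]
      have hbc : (c == ';') = false := by simp [hc]
      simp only [hbc, Bool.false_eq_true, if_false]
      rw [ih trees (cur ++ [c])]
      simp only [pvSplit, if_neg hc, pvPrep_pvPrep]

-- ===== VERDICT (by name: the statement is the Claim_ definition above) =====
theorem extract_newick_trees_spec : Claim_equal_extract_newick_trees := by
  intro text _ _
  unfold Spec_extract_newick_trees extract_newick_trees extract_newick_trees_alt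
  rw [splitOn_eq_pvSplit]
  have := loopA text.toList [] []
  rw [this, pvPrep_nil (pvSplit_ne_nil text.toList)]
  simp
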